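-- pv_equiv track=rewrite | github.com/badgerdoc/badgerdoc | table_extractor/borderless_service/semi_bordered.py | filter_gaps
-- ===== SOURCE A (Python) =====
-- from typing import Iterable, List, Optional, Tuple
--
-- def filter_gaps(gaps_1d: List[bool], threshold):
--     # TODO: make adaptive threshold
--     filtered_gaps = []
--     ctr = 0
--     for val in gaps_1d:
--         if val:
--             ctr += 1
--         else:
--             filtered_gaps += [True if ctr >= threshold else False] * ctr
--             ctr = 1
--     else:
--         filtered_gaps += [True] * ctr
--     return filtered_gaps
-- ===== SOURCE B (Python) =====
-- def filter_gaps(gaps_1d, threshold):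
--     falses = [i for i, v in enumerate(gaps_1d) if not v]
--     out = []
--     prev = 0
--     for f in falses:
--         run = f - prev
--         out += [run >= threshold] * run
--         prev = f
--     out += [True] * (len(gaps_1d) - prev)
--     return out
-- ===== Notes on version B (the rewrite author's own statement) =====
-- stated objective: alternative
-- what changed: B first extracts the index list of False positions and then emits each run from consecutive index gaps arithmetically, instead of A's single pass carrying a running counter that is reset at each False.
import Mathlib
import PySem

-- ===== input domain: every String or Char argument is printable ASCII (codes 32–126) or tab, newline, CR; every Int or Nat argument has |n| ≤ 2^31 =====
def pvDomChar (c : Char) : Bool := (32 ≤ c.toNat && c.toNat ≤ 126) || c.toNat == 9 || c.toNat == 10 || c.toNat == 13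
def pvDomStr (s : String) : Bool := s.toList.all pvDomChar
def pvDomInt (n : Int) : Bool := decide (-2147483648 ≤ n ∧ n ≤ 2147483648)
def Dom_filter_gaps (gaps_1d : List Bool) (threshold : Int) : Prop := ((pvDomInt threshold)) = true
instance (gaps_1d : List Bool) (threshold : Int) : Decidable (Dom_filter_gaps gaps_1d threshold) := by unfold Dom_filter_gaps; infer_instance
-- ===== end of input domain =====

-- B extracts the list of False positions first and emits each run from consecutive index gaps,
-- replacing A's single pass with a reset counter (objective: alternative decomposition, same cost).


-- ===== PORT A =====
-- Literal port of A: one fold carrying (filtered_gaps, ctr); the for-else appends [True]*ctr at the end.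
def filter_gaps (gaps_1d : List Bool) (threshold : Int) : List Bool :=
  let s := gaps_1d.foldl (fun (st : List Bool × Int) val =>
      if val then (st.1, st.2 + 1)
      else (st.1 ++ List.replicate st.2.toNat (decide (st.2 ≥ threshold)), 1)) ([], 0)
  s.1 ++ List.replicate s.2.toNat true

-- ===== PORT B =====
-- Literal port of Source B: build the False-index list, then fold over it with (out, prev).
def filter_gaps_alt (gaps_1d : List Bool) (threshold : Int) : List Bool :=
  let falses : List Int :=
    (PySem.List.enumerate gaps_1d).filterMap (fun p => if p.2 = false then some p.1 else none)
  let s := falses.foldl (fun (st : List Bool × Int) f =>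
      (st.1 ++ List.replicate (f - st.2).toNat (decide (f - st.2 ≥ threshold)), f)) ([], 0)
  s.1 ++ List.replicate ((gaps_1d.length : Int) - s.2).toNat true

-- ===== PRECONDITION & SPEC =====
def Spec_filter_gaps (gaps_1d : List Bool) (threshold : Int) (out : List Bool) : Prop := out = filter_gaps_alt gaps_1d threshold
instance (gaps_1d : List Bool) (threshold : Int) (out : List Bool) : Decidable (Spec_filter_gaps gaps_1d threshold out) := by unfold Spec_filter_gaps; infer_instance

-- ===== CLAIM (what is proved, stated in full; the proofs are below) =====
def Claim_equal_filter_gaps : Prop := ∀ (gaps_1d : List Bool) (threshold : Int), Dom_filter_gaps gaps_1d threshold → Spec_filter_gaps gaps_1d threshold (filter_gaps gaps_1d threshold)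

-- ===== LEMMAS AND PROOFS =====

-- Common characterisation: process l with current run counter c.
def fgSpec (t : Int) : List Bool → Int → List Bool
  | [], c => List.replicate c.toNat true
  | true :: xs, c => fgSpec t xs (c + 1)
  | false :: xs, c => List.replicate c.toNat (decide (c ≥ t)) ++ fgSpec t xs 1

theorem fg_a_run (t : Int) (l : List Bool) : ∀ (acc : List Bool) (c : Int),
    (let s := l.foldl (fun (st : List Bool × Int) val =>
        if val then (st.1, st.2 + 1)
        else (st.1 ++ List.replicate st.2.toNat (decide (st.2 ≥ t)), 1)) (acc, c)
     s.1 ++ List.replicate s.2.toNat true) = acc ++ fgSpec t l c := by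
  induction l with
  | nil => intro acc c; simp [fgSpec]
  | cons x xs ih =>
    intro acc c
    cases x with
    | true => simpa [fgSpec] using ih acc (c + 1)
    | false =>
      simpa [fgSpec, List.append_assoc] using
        ih (acc ++ List.replicate c.toNat (decide (c ≥ t))) 1

-- The False-index list of l, indices starting at offset o.
def fgFalses (o : Int) : List Bool → List Int
  | [] => []
  | true :: xs => fgFalses (o + 1) xs
  | false :: xs => o :: fgFalses (o + 1) xs

theorem fg_enum_falses (l : List Bool) : ∀ (o : Int),
    (PySem.List.enumerate l o).filterMap (fun p => if p.2 = false then some p.1 else none)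
      = fgFalses o l := by
  induction l with
  | nil => intro o; simp [PySem.List.enumerate_nil, fgFalses]
  | cons x xs ih =>
    intro o
    cases x <;> simp [PySem.List.enumerate_cons, fgFalses, ih]

theorem fg_b_run (t : Int) (l : List Bool) : ∀ (o prev : Int) (acc : List Bool), prev ≤ o →
    (let s := (fgFalses o l).foldl (fun (st : List Bool × Int) f =>
        (st.1 ++ List.replicate (f - st.2).toNat (decide (f - st.2 ≥ t)), f)) (acc, prev)
     s.1 ++ List.replicate ((o + l.length) - s.2).toNat true) = acc ++ fgSpec t l (o - prev) := by
  induction l with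
  | nil => intro o prev acc h; simp [fgFalses, fgSpec]
  | cons x xs ih =>
    cases x with
    | true =>
      intro o prev acc h
      have h1 := ih (o + 1) prev acc (by omega)
      rw [show (o + 1 : Int) - prev = o - prev + 1 by ring] at h1
      simp only [fgFalses, fgSpec, List.length_cons]
      push_cast at h1 ⊢
      rw [show o + ((xs.length : Int) + 1) = o + 1 + xs.length by ring]
      exact h1
    | false =>
      intro o prev acc h
      have h1 := ih (o + 1) o (acc ++ List.replicate (o - prev).toNat (decide (o - prev ≥ t))) (by omega)
      rw [show (o + 1 : Int) - o = 1 by ring, List.append_assoc] at h1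
      simp only [fgFalses, fgSpec, List.length_cons, List.foldl_cons]
      push_cast at h1 ⊢
      rw [show o + ((xs.length : Int) + 1) = o + 1 + xs.length by ring]
      exact h1

-- ===== VERDICT (by name: the statement is the Claim_ definition above) =====
theorem filter_gaps_spec : Claim_equal_filter_gaps := by
  intro l t _
  unfold Spec_filter_gaps filter_gaps filter_gaps_alt
  have ha := fg_a_run t l [] 0
  have hb := fg_b_run t l 0 0 [] le_rfl
  simp only [List.nil_append, zero_add, sub_zero] at ha hb
  rw [fg_enum_falses l 0] at *
  simp only [ha, hb]
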